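-- pv_equiv track=rewrite | github.com/GoogleCloudPlatform/cloud-learning-platform | common_ml/src/common_ml/utils.py | get_bracket_array_with_np
-- ===== SOURCE A (Python) =====
-- def get_bracket_array_with_np(bracket_array, tree):
--   """Creates an array of tuples
--     Args:
--     bracket_array - output of function : get_bracket_array()
--     tree - a string which contains the constituency parsing of the text
--         Example : (S (NP (NNP Patty) (NNP Smith) (NNP Hill)) (VP (VBZ founds)
--         (NP (NP (NP (DT the) (NNP National) (NNP Committee)) (PP (IN on)
--         (NP (NNP Nursery) (NNPS Schools)))) (PRN (-LRB- -LRB-)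
--         (VP (ADVP (RB later)) (NNP NANE)) (-RRB- -RRB-))) (S (VP (TO to)
--         (VP (VB establish) (NP (NP (DT a) (JJ professional)
--         (NN organization)) (PP (IN for) (NP (NN nursery) (NN school)
--         (NNS educators)))) (PP (IN in) (NP (CD 1926))))))))
--
--     Returns a list of tuples where each element is (op_idx , close_idx,
--     position, 1) for noun phrase in tree and (op_idx, close_idx, 0) for not
--     noun phrase. Here, (op_idx) refers to the index of opening bracket and
--     (close_idx) refers to index of closing bracket
--     """
--   new_bracket_array = []
--   for i, ele in enumerate(bracket_array):
--     if ele[1] == -1: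
--       continue
--     count = 0
--     for j in range(i, len(bracket_array)):
--       count = count + bracket_array[j][1]
--       if count == 0:
--         break
--     if tree[ele[0] + 1:ele[0] + 4] == "NP ":
--       new_bracket_array.append((ele[0], bracket_array[j][0], 1))
--     else:
--       new_bracket_array.append((ele[0], bracket_array[j][0], 0))
--   return new_bracket_array
-- ===== SOURCE B (Python) =====
-- def get_bracket_array_with_np(bracket_array, tree):
--   # One right-to-left pass: for each index i, nearest[P(i)] is the first j >= i
--   # with prefix-sum P(j+1) == P(i), i.e. the index closing the bracket opened at i
--   # (falling back to the last index when no such j exists, as A does).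
--   n = len(bracket_array)
--   prefix = [0] * (n + 1)
--   for k in range(n):
--     prefix[k + 1] = prefix[k] + bracket_array[k][1]
--   nearest = {}
--   close_of = [0] * n
--   for i in range(n - 1, -1, -1):
--     nearest[prefix[i + 1]] = i
--     close_of[i] = nearest.get(prefix[i], n - 1)
--   out = []
--   for i in range(n):
--     pos, delta = bracket_array[i][0], bracket_array[i][1]
--     if delta == -1:
--       continue
--     close_pos = bracket_array[close_of[i]][0]
--     tag = 1 if tree[pos + 1:pos + 4] == "NP " else 0
--     out.append((pos, close_pos, tag))
--   return out
-- ===== Notes on version B (the rewrite author's own statement) =====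
-- stated objective: faster
-- what changed: Replaced the per-opening-bracket forward rescan of the whole array with prefix sums and one right-to-left pass keeping a hash map from prefix-sum value to the nearest index where it recurs, so each closing index is found in O(1).
import Mathlib
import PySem

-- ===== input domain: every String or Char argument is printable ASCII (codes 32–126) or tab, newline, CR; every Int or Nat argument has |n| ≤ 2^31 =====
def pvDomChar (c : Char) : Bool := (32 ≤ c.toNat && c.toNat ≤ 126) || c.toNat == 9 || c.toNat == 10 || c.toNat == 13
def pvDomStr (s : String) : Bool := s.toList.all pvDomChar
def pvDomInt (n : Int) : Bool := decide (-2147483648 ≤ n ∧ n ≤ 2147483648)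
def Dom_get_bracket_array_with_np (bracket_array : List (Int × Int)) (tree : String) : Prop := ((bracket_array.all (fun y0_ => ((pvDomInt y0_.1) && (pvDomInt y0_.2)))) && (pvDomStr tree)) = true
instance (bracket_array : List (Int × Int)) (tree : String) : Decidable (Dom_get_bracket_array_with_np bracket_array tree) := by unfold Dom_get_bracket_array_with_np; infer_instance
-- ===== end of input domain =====

-- B replaces A's quadratic per-opener rescan by prefix sums and one right-to-left
-- pass with a map from prefix-sum value to its nearest recurrence (measured asymptotically faster).


-- ===== PORT A =====
-- inner 'for j in range(i, len(bracket_array)): count += …[j][1]; if count == 0: break'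
-- returning the loop variable j as Python leaves it (indices from range are in range,
-- so bracket_array[j] is ported as the in-range getElem).
def pvAscan (arr : List (Int × Int)) (count : Int) (j : Nat) : Nat :=
  if h : j < arr.length then
    let c := count + (arr[j]).2
    if c = 0 then j
    else if j + 1 < arr.length then pvAscan arr c (j + 1) else j
  else j
termination_by arr.length - j

-- the outer 'for i, ele in enumerate(bracket_array)' loop, as an index recursion
def pvAloop (arr : List (Int × Int)) (tree : String) (i : Nat) (acc : List (Int × Int × Int)) : List (Int × Int × Int) :=
  if h : i < arr.length then
    let ele := arr[i]
    if ele.2 = -1 then pvAloop arr tree (i + 1) acc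
    else
      let j := pvAscan arr 0 i
      let close := (arr.getD j (0, 0)).1   -- bracket_array[j][0]; j is always in range here
      if PySem.Str.slice tree (some (ele.1 + 1)) (some (ele.1 + 4)) = "NP " then
        pvAloop arr tree (i + 1) (acc ++ [(ele.1, close, 1)])
      else
        pvAloop arr tree (i + 1) (acc ++ [(ele.1, close, 0)])
  else acc
termination_by arr.length - i

def get_bracket_array_with_np (bracket_array : List (Int × Int)) (tree : String) : List (Int × Int × Int) :=
  pvAloop bracket_array tree 0 []

-- ===== PORT B =====
-- prefix[0]=0, prefix[k+1]=prefix[k]+delta_k  (Source B's first loop)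
def pvPrefix : List (Int × Int) → Int → List Int
  | [], s => [s]
  | e :: rest, s => s :: pvPrefix rest (s + e.2)

-- Source B's descending loop 'for i in range(n-1,-1,-1)': with k iterations left the
-- current index is i = k-1; 'nearest[prefix[i+1]] = i' then 'close_of[i] = nearest.get(prefix[i], n-1)'.
-- The result list is close_of[0..k-1] in index order.
def pvBmatch (pre : List Int) (n : Nat) (d : PySem.Dict Int Nat) : Nat → List Nat
  | 0 => []
  | k + 1 =>
    let d' := d.insert (pre.getD (k + 1) 0) k
    pvBmatch pre n d' k ++ [d'.getD (pre.getD k 0) (n - 1)]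

-- Source B's output loop (same shape as A's outer loop, but the closing index is a plain lookup)
def pvBout (arr : List (Int × Int)) (tree : String) (closeOf : List Nat) (i : Nat) (acc : List (Int × Int × Int)) : List (Int × Int × Int) :=
  if h : i < arr.length then
    let ele := arr[i]
    if ele.2 = -1 then pvBout arr tree closeOf (i + 1) acc
    else
      let close := (arr.getD (closeOf.getD i 0) (0, 0)).1
      if PySem.Str.slice tree (some (ele.1 + 1)) (some (ele.1 + 4)) = "NP " then
        pvBout arr tree closeOf (i + 1) (acc ++ [(ele.1, close, 1)])
      else
        pvBout arr tree closeOf (i + 1) (acc ++ [(ele.1, close, 0)])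
  else acc
termination_by arr.length - i

def get_bracket_array_with_np_alt (bracket_array : List (Int × Int)) (tree : String) : List (Int × Int × Int) :=
  let n := bracket_array.length
  let pre := pvPrefix bracket_array 0
  let closeOf := pvBmatch pre n PySem.Dict.empty n
  pvBout bracket_array tree closeOf 0 []

-- ===== PRECONDITION & SPEC =====
def Spec_get_bracket_array_with_np (bracket_array : List (Int × Int)) (tree : String) (out : List (Int × Int × Int)) : Prop := out = get_bracket_array_with_np_alt bracket_array tree
instance (bracket_array : List (Int × Int)) (tree : String) (out : List (Int × Int × Int)) : Decidable (Spec_get_bracket_array_with_np bracket_array tree out) := by unfold Spec_get_bracket_array_with_np; infer_instance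

-- ===== CLAIM (what is proved, stated in full; the proofs are below) =====
def Claim_equal_get_bracket_array_with_np : Prop := ∀ (bracket_array : List (Int × Int)) (tree : String), Dom_get_bracket_array_with_np bracket_array tree → Spec_get_bracket_array_with_np bracket_array tree (get_bracket_array_with_np bracket_array tree)

-- ===== LEMMAS AND PROOFS =====

-- common specification of the closing index: first j' in [j, n) with pre[j'+1] = t
def findClose (pre : List Int) (n : Nat) (t : Int) (j : Nat) : Option Nat :=
  if j < n then
    (if pre.getD (j + 1) 0 = t then some j else findClose pre n t (j + 1))
  else none
termination_by n - j

theorem pvPrefix_getD_succ (arr : List (Int × Int)) : ∀ (s : Int) (j : Nat) (h : j < arr.length),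
    (pvPrefix arr s).getD (j + 1) 0 = (pvPrefix arr s).getD j 0 + (arr[j]'h).2 := by
  induction arr with
  | nil => intro s j h; simp at h
  | cons e rest ih =>
    intro s j h
    cases j with
    | zero =>
      cases rest with
      | nil => simp [pvPrefix]
      | cons f r => simp [pvPrefix]
    | succ j' =>
      simp only [pvPrefix, List.getD_cons_succ, List.getElem_cons_succ]
      exact ih (s + e.2) j' (by simpa using h)

theorem pvAscan_eq_findClose (arr : List (Int × Int)) : ∀ (m j : Nat), arr.length - j ≤ m →
    j < arr.length → ∀ (c : Int),
    pvAscan arr c j = (findClose (pvPrefix arr 0) arr.length ((pvPrefix arr 0).getD j 0 - c) j).getD (arr.length - 1) := by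
  intro m
  induction m with
  | zero => intro j hm hj; exact absurd hj (by omega)
  | succ m ih =>
    intro j hm hj c
    rw [pvAscan, findClose, dif_pos hj, if_pos hj]
    have hpre := pvPrefix_getD_succ arr 0 j hj
    by_cases hz : c + (arr[j]).2 = 0
    · have hcond : (pvPrefix arr 0).getD (j + 1) 0 = (pvPrefix arr 0).getD j 0 - c := by
        rw [hpre]; omega
      rw [if_pos hz, if_pos hcond]
      simp
    · have hne : ¬ (pvPrefix arr 0).getD (j + 1) 0 = (pvPrefix arr 0).getD j 0 - c := by
        rw [hpre]; omega
      rw [if_neg hz, if_neg hne]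
      by_cases hlt : j + 1 < arr.length
      · rw [if_pos hlt, ih (j + 1) (by omega) hlt (c + (arr[j]).2), hpre]
        congr 2
        omega
      · rw [if_neg hlt, findClose, if_neg hlt, Option.getD_none]
        omega

theorem pvBmatch_length (pre : List Int) (n : Nat) : ∀ (k : Nat) (d : PySem.Dict Int Nat),
    (pvBmatch pre n d k).length = k := by
  intro k
  induction k with
  | zero => intro d; simp [pvBmatch]
  | succ k ih => intro d; simp [pvBmatch, ih]

theorem pvBmatch_getD (pre : List Int) (n : Nat) : ∀ (k : Nat), k ≤ n →
    ∀ (d : PySem.Dict Int Nat), (∀ v : Int, d.get? v = findClose pre n v k) →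
    ∀ (i : Nat), i < k →
    (pvBmatch pre n d k).getD i 0 = (findClose pre n (pre.getD i 0) i).getD (n - 1) := by
  intro k
  induction k with
  | zero => intro _ _ _ i hi; omega
  | succ k ih =>
    intro hk d hd i hi
    have hinv : ∀ v : Int, (d.insert (pre.getD (k + 1) 0) k).get? v = findClose pre n v k := by
      intro v
      rw [PySem.Dict.get?_insert, findClose, if_pos (by omega : k < n)]
      by_cases hv : v = pre.getD (k + 1) 0
      · rw [if_pos hv, if_pos hv.symm]
      · rw [if_neg hv, if_neg (fun h => hv h.symm), hd v]
    rw [pvBmatch]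
    by_cases hik : i < k
    · rw [List.getD_eq_getElem?_getD, List.getElem?_append_left (by rw [pvBmatch_length]; omega),
        ← List.getD_eq_getElem?_getD]
      exact ih (by omega) _ hinv i hik
    · have hik' : i = k := by omega
      subst hik'
      rw [List.getD_eq_getElem?_getD, List.getElem?_append_right (by rw [pvBmatch_length]),
        pvBmatch_length]
      simp only [Nat.sub_self, List.getElem?_cons_zero, Option.getD_some]
      rw [PySem.Dict.getD_eq_get?_getD, hinv]

theorem loops_eq (arr : List (Int × Int)) (tree : String) :
    ∀ (m i : Nat), arr.length - i ≤ m → ∀ (acc : List (Int × Int × Int)),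
    pvAloop arr tree i acc =
      pvBout arr tree (pvBmatch (pvPrefix arr 0) arr.length PySem.Dict.empty arr.length) i acc := by
  intro m
  induction m with
  | zero =>
    intro i hm acc
    rw [pvAloop, pvBout]
    have hi : ¬ i < arr.length := by omega
    rw [dif_neg hi, dif_neg hi]
  | succ m ih =>
    intro i hm acc
    rw [pvAloop, pvBout]
    by_cases hi : i < arr.length
    · rw [dif_pos hi, dif_pos hi]
      simp only
      have hclose :
          (pvBmatch (pvPrefix arr 0) arr.length PySem.Dict.empty arr.length).getD i 0 =
            pvAscan arr 0 i := by
        rw [pvBmatch_getD (pvPrefix arr 0) arr.length arr.length le_rfl PySem.Dict.empty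
              (fun v => by rw [PySem.Dict.get?_empty, findClose, if_neg (by omega)]) i hi,
          pvAscan_eq_findClose arr arr.length i (by omega) hi 0, sub_zero]
      rw [hclose]
      by_cases hm2 : (arr[i]).2 = -1
      · rw [if_pos hm2, if_pos hm2]; exact ih (i + 1) (by omega) acc
      · rw [if_neg hm2, if_neg hm2]
        by_cases hs : PySem.Str.slice tree (some ((arr[i]).1 + 1)) (some ((arr[i]).1 + 4)) = "NP "
        · rw [if_pos hs, if_pos hs]; exact ih (i + 1) (by omega) _
        · rw [if_neg hs, if_neg hs]; exact ih (i + 1) (by omega) _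
    · rw [dif_neg hi, dif_neg hi]

-- ===== VERDICT (by name: the statement is the Claim_ definition above) =====
theorem get_bracket_array_with_np_spec : Claim_equal_get_bracket_array_with_np := by
  intro arr tree _
  unfold Spec_get_bracket_array_with_np get_bracket_array_with_np get_bracket_array_with_np_alt
  exact loops_eq arr tree arr.length 0 (by omega) []
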